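-- pv_equiv track=rewrite | github.com/marcinnowakowski/boolean_bayesian_networks | boolean_networks/truth_tables/transitions_2_truth_table.py | transitions_to_truth_table
-- ===== SOURCE A (Python) =====
-- from typing import Dict, List
--
-- def hamming_distance(s1: str, s2: str) -> int:
--     """Return number of differing bits between two states."""
--     return sum(c1 != c2 for c1, c2 in zip(s1, s2))
--
-- def differing_bit_index(s1: str, s2: str) -> int:
--     """Return index of the single differing bit. Assumes exactly 1 bit differs."""
--     for i, (c1, c2) in enumerate(zip(s1, s2)):
--         if c1 != c2:
--             return i
--     return -1
--
-- def transitions_to_truth_table(transitions: Dict[str, List[str]], num_vars: int = None) -> Dict[str, Dict[str, str]]: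
--     """
--     Convert transitions to truth table format.
--
--     For each state:
--       - Look at transitions to find which variable changes to which next state
--       - If no transition for a variable, use self-loop (state stays same)
--
--     Args:
--         transitions: Dict mapping state -> list of next states
--         num_vars: Number of variables (auto-detected if None)
--
--     Returns:
--         Dict mapping state -> {variable -> next_state_if_that_var_changes}
--     """
--     # Auto-detect num_vars from first state
--     if num_vars is None:
--         first_state = next(iter(transitions.keys()), None)
--         if first_state:
--             num_vars = len(first_state)
--         else:
--             num_vars = 5  # default
--
--     var_names = [f"x{i+1}" for i in range(num_vars)]
--     truth_table = {}
--
--     # Generate all possible states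
--     all_states = [format(i, f'0{num_vars}b') for i in range(2 ** num_vars)]
--
--     for state in all_states:
--         next_states = {}
--
--         # Get transitions from this state (empty list if missing = self-loop only)
--         state_transitions = transitions.get(state, [])
--
--         # For each variable, find what happens when it changes
--         for var_idx, var in enumerate(var_names):
--             # Look for a transition that changes only this variable
--             found = False
--             for next_state in state_transitions:
--                 if hamming_distance(state, next_state) == 1:
--                     if differing_bit_index(state, next_state) == var_idx:
--                         next_states[var] = next_state
--                         found = True
--                         break
--
--             # If no transition for this variable, use self-loop
--             if not found:
--                 next_states[var] = state
--
--         truth_table[state] = next_states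
--
--     return truth_table
-- ===== SOURCE B (Python) =====
-- def transitions_to_truth_table(transitions, num_vars=None):
--     # Per state: one pass over its transitions mapping differing-bit index -> next state
--     # (first wins), then fill the row with self-loops for unmapped variables.
--     if num_vars is None:
--         first_state = next(iter(transitions.keys()), None)
--         num_vars = len(first_state) if first_state else 5
--     truth_table = {}
--     for i in range(2 ** num_vars):
--         state = format(i, f'0{num_vars}b')
--         by_var = {}
--         for ns in transitions.get(state, []):
--             diffs = [j for j, (a, b) in enumerate(zip(state, ns)) if a != b]
--             if len(diffs) == 1 and diffs[0] not in by_var: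
--                 by_var[diffs[0]] = ns
--         truth_table[state] = {f"x{j+1}": by_var.get(j, state) for j in range(num_vars)}
--     return truth_table
-- ===== Notes on version B (the rewrite author's own statement) =====
-- stated objective: alternative
-- what changed: Instead of rescanning the state's transition list once per variable (A computes the hamming distance and the differing index separately for every variable), B scans each state's transitions once, building a dict from differing-bit index to the first matching next state, then fills the row from that dict with self-loop defaults.
import Mathlib
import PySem

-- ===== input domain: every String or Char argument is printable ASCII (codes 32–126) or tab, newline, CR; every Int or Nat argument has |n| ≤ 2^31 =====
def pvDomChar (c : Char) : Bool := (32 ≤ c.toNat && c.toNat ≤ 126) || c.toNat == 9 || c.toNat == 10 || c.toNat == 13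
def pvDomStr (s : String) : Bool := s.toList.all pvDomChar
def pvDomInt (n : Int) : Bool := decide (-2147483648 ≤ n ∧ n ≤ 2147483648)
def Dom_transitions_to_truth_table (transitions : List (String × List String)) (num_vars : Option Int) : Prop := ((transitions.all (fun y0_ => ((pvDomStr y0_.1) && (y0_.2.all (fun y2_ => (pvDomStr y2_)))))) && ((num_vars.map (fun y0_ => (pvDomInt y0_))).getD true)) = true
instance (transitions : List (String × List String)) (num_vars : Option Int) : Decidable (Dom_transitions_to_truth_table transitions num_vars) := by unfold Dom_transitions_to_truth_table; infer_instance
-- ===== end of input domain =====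

-- B replaces A's per-variable rescans of each state's transition list (hamming distance +
-- differing index recomputed per variable) by one pass per state building an index→next-state
-- dict (first wins), then filling the row with self-loop defaults.


-- ===== PORT A =====
-- shared with B: num_vars auto-detection (Python's `if first_state:` is falsy on "" and on an
-- empty dict) and state generation format(i, f'0{nv}b')
def pvNumVars (transitions : List (String × List String)) (num_vars : Option Int) : Nat :=
  match num_vars with
  | some n => n.toNat          -- Pre_ guarantees 0 ≤ n (A raises TypeError on negatives)
  | none =>
    match transitions with
    | [] => 5
    | (k, _) :: _ => if k.toList = [] then 5 else k.toList.length

def pvBinPad (w : Nat) (i : Int) : String :=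
  let ds := PySem.Int.toBinChars i
  String.ofList (List.replicate (w - ds.length) '0' ++ ds)

-- sum(c1 != c2 for c1, c2 in zip(s1, s2))
def pvHamming (s1 s2 : List Char) : Nat :=
  (s1.zip s2).countP (fun p => p.1 != p.2)

-- differing_bit_index: first differing position over the zip, -1 if none
def pvDiffIdxAux : Int → List (Char × Char) → Int
  | _, [] => -1
  | i, p :: rest => if p.1 ≠ p.2 then i else pvDiffIdxAux (i + 1) rest

def pvDiffIdx (s1 s2 : List Char) : Int := pvDiffIdxAux 0 (s1.zip s2)

-- A's inner search with `break`: first transition changing exactly the given variable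
def pvFindTrans (state : List Char) (varIdx : Int) : List String → Option String
  | [] => none
  | ns :: rest =>
    if pvHamming state ns.toList = 1 ∧ pvDiffIdx state ns.toList = varIdx then some ns
    else pvFindTrans state varIdx rest

def transitions_to_truth_table (transitions : List (String × List String)) (num_vars : Option Int) : List (String × List (String × String)) :=
  let nv := pvNumVars transitions num_vars
  let varNames := (List.range nv).map (fun (i : Nat) => "x" ++ PySem.Int.toStr ((i : Int) + 1))
  let allStates := (List.range (2 ^ nv)).map (fun i => pvBinPad nv (i : Int))
  allStates.map (fun state =>
    let st := (PySem.Dict.mk transitions).getD state []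
    -- next_states[var] = … over enumerate(var_names): the keys x1…xn are pairwise distinct,
    -- so each dict insertion appends a fresh key; the dict is the list of pairs in order
    (state, ((List.range nv).zip varNames).map (fun p =>
      (p.2, match pvFindTrans state.toList ((p.1 : Int)) st with
            | some ns => ns
            | none => state))))

-- ===== PORT B =====
-- [j for j, (a, b) in enumerate(zip(state, ns)) if a != b]
def pvDiffListAux : Nat → List (Char × Char) → List Nat
  | _, [] => []
  | i, p :: rest => if p.1 ≠ p.2 then i :: pvDiffListAux (i + 1) rest else pvDiffListAux (i + 1) rest

def pvDiffList (s1 s2 : List Char) : List Nat := pvDiffListAux 0 (s1.zip s2)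

-- one pass over the state's transitions: differing-bit index -> first next state with it
def pvByVar (state : List Char) (sts : List String) : PySem.Dict Nat String :=
  sts.foldl (fun d ns =>
    match pvDiffList state ns.toList with
    | [k] => if d.contains k then d else d.insert k ns
    | _ => d) PySem.Dict.empty

def transitions_to_truth_table_alt (transitions : List (String × List String)) (num_vars : Option Int) : List (String × List (String × String)) :=
  let nv := pvNumVars transitions num_vars
  let allStates := (List.range (2 ^ nv)).map (fun i => pvBinPad nv (i : Int))
  allStates.map (fun state =>
    let byVar := pvByVar state.toList ((PySem.Dict.mk transitions).getD state [])
    -- {f"x{j+1}": by_var.get(j, state) for j in range(num_vars)}: keys distinct, in order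
    (state, (List.range nv).map (fun (j : Nat) =>
      ("x" ++ PySem.Int.toStr ((j : Int) + 1), byVar.getD j state))))

-- ===== PRECONDITION & SPEC =====
-- Pre_ excludes only num_vars = some n with n < 0, on which A raises TypeError
-- (2 ** n is a float, range() rejects it); B raises there too.
def Pre_transitions_to_truth_table (transitions : List (String × List String)) (num_vars : Option Int) : Prop :=
  0 ≤ num_vars.getD 0
instance (transitions : List (String × List String)) (num_vars : Option Int) : Decidable (Pre_transitions_to_truth_table transitions num_vars) := by unfold Pre_transitions_to_truth_table; infer_instance

def pvWitness_transitions_to_truth_table : (List (String × List String)) × Option Int :=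
  ([("01", ["11", "00"])], some 2)

def Spec_transitions_to_truth_table (transitions : List (String × List String)) (num_vars : Option Int) (out : List (String × List (String × String))) : Prop := out = transitions_to_truth_table_alt transitions num_vars
instance (transitions : List (String × List String)) (num_vars : Option Int) (out : List (String × List (String × String))) : Decidable (Spec_transitions_to_truth_table transitions num_vars out) := by unfold Spec_transitions_to_truth_table; infer_instance

-- ===== CLAIM (what is proved, stated in full; the proofs are below) =====
def Claim_equal_transitions_to_truth_table : Prop := ∀ (transitions : List (String × List String)) (num_vars : Option Int), Dom_transitions_to_truth_table transitions num_vars → Pre_transitions_to_truth_table transitions num_vars → Spec_transitions_to_truth_table transitions num_vars (transitions_to_truth_table transitions num_vars)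

-- ===== LEMMAS AND PROOFS =====

-- the one differing index equals the head of the differing-index list (or -1)
theorem pv_diffIdx_eq_diffList : ∀ (z : List (Char × Char)) (i : Nat),
    pvDiffIdxAux (i : Int) z = match pvDiffListAux i z with | [] => -1 | k :: _ => (k : Int) := by
  intro z
  induction z with
  | nil => intro i; rfl
  | cons p rest ih =>
    intro i
    by_cases h : p.1 ≠ p.2
    · simp [pvDiffIdxAux, pvDiffListAux, h]
    · have hc : (i : Int) + 1 = ((i + 1 : Nat) : Int) := by push_cast; ring
      simp only [pvDiffIdxAux, pvDiffListAux, if_neg h, hc]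
      exact ih (i + 1)

-- the hamming distance equals the length of the differing-index list
theorem pv_count_eq_diffList_length : ∀ (z : List (Char × Char)) (i : Nat),
    z.countP (fun p => p.1 != p.2) = (pvDiffListAux i z).length := by
  intro z
  induction z with
  | nil => intro i; rfl
  | cons p rest ih =>
    intro i
    by_cases h : p.1 ≠ p.2
    · simp [pvDiffListAux, h, ih (i + 1)]
    · simp [pvDiffListAux, h, ih (i + 1)]

-- A's per-transition test ⟺ B's differing-index list is exactly [j]
theorem pv_cond_iff (s t : List Char) (j : Nat) :
    (pvHamming s t = 1 ∧ pvDiffIdx s t = (j : Int)) ↔ pvDiffList s t = [j] := by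
  unfold pvHamming pvDiffIdx pvDiffList
  rw [pv_count_eq_diffList_length (s.zip t) 0]
  rw [show ((0 : Int) = ((0 : Nat) : Int)) from rfl, pv_diffIdx_eq_diffList (s.zip t) 0]
  constructor
  · rintro ⟨h1, h2⟩
    match hdl : pvDiffListAux 0 (s.zip t) with
    | [] => rw [hdl] at h1; simp at h1
    | k :: ks =>
      rw [hdl] at h1 h2
      simp at h1 h2
      simp [h1, h2]
  · intro h
    rw [h]
    simp

-- B's fold resolves lookups to A's first-match search
theorem pv_fold_get? (s : List Char) : ∀ (lst : List String) (d : PySem.Dict Nat String) (j : Nat),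
    ((lst.foldl (fun d ns =>
        match pvDiffList s ns.toList with
        | [k] => if d.contains k then d else d.insert k ns
        | _ => d) d).get? j)
      = (match d.get? j with
         | some v => some v
         | none => pvFindTrans s (j : Int) lst) := by
  intro lst
  induction lst with
  | nil =>
    intro d j
    simp only [List.foldl_nil]
    cases d.get? j <;> rfl
  | cons ns rest ih =>
    intro d j
    simp only [List.foldl_cons]
    rw [ih]
    have hcond : (pvHamming s ns.toList = 1 ∧ pvDiffIdx s ns.toList = (j : Int))
        ↔ pvDiffList s ns.toList = [j] := pv_cond_iff s ns.toList j
    match hdl : pvDiffList s ns.toList with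
    | [] =>
      have : ¬ (pvHamming s ns.toList = 1 ∧ pvDiffIdx s ns.toList = (j : Int)) := by
        rw [hcond, hdl]; simp
      rw [pvFindTrans, if_neg this]
    | k :: k2 :: ks =>
      have : ¬ (pvHamming s ns.toList = 1 ∧ pvDiffIdx s ns.toList = (j : Int)) := by
        rw [hcond, hdl]; simp
      rw [pvFindTrans, if_neg this]
    | [k] =>
      by_cases hkj : k = j
      · subst hkj
        have hc : pvHamming s ns.toList = 1 ∧ pvDiffIdx s ns.toList = (k : Int) := by
          rw [hcond, hdl]
        rw [pvFindTrans, if_pos hc]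
        dsimp only
        by_cases hct : (d.contains k : Bool)
        · have : (d.get? k).isSome := by rw [← PySem.Dict.contains_eq_isSome_get?]; exact hct
          rw [if_pos hct]
          match hg : d.get? k with
          | some v => rfl
          | none => rw [hg] at this; simp at this
        · have hg : d.get? k = none := by
            cases hgg : d.get? k with
            | none => rfl
            | some v =>
              exfalso; apply hct
              rw [PySem.Dict.contains_eq_isSome_get?, hgg]; rfl
          rw [if_neg hct, hg, PySem.Dict.get?_insert_self]
      · have hic : ¬ (pvHamming s ns.toList = 1 ∧ pvDiffIdx s ns.toList = (j : Int)) := by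
          rw [hcond, hdl]; simp [hkj]
        rw [pvFindTrans, if_neg hic]
        dsimp only
        by_cases hct : (d.contains k : Bool)
        · rw [if_pos hct]
        · rw [if_neg hct, PySem.Dict.get?_insert_of_ne _ _ (Ne.symm hkj)]

-- per-variable entry: A's searched value = B's dict lookup with self-loop default
theorem pv_entry_eq (s : List Char) (st : List String) (j : Nat) (dflt : String) :
    (match pvFindTrans s (j : Int) st with
     | some ns => ns
     | none => dflt) = (pvByVar s st).getD j dflt := by
  rw [PySem.Dict.getD_eq_get?_getD]
  unfold pvByVar
  rw [pv_fold_get? s st PySem.Dict.empty j, PySem.Dict.get?_empty]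
  cases pvFindTrans s (j : Int) st <;> rfl

-- ===== VERDICT (by name: the statement is the Claim_ definition above) =====
theorem transitions_to_truth_table_spec : Claim_equal_transitions_to_truth_table := by
  intro transitions num_vars _ _
  unfold Spec_transitions_to_truth_table
  unfold transitions_to_truth_table transitions_to_truth_table_alt
  dsimp only
  apply List.map_congr_left
  intro state _
  dsimp only
  congr 1
  rw [← List.map_prod_left_eq_zip, List.map_map]
  apply List.map_congr_left
  intro j _
  dsimp only [Function.comp]
  exact congrArg (fun v => ("x" ++ PySem.Int.toStr ((j : Int) + 1), v))
    (pv_entry_eq state.toList ((PySem.Dict.mk transitions).getD state []) j state)
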